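-- pv_equiv track=rewrite | github.com/inktan/Fi-Mao-Tech | csv-handle/csv_filter01.py | generate_alternating_list
-- ===== SOURCE A (Python) =====
-- def generate_alternating_list(A, length):
--     # 初始化结果列表
--     result = []
--
--     # 生成列表
--     for i in range(length):
--         if i % 2 == 0:
--             result.append(A + (i // 2))  # 添加 A + 0, A + 1, A + 2, ...
--         else:
--             result.append(A - (i // 2 + 1))  # 添加 A - 1, A - 2, A - 3, ...
--
--     return result
-- ===== SOURCE B (Python) =====
-- def generate_alternating_list(A, length):
--     if length <= 0:
--         return []
--     n_plus = (length + 1) // 2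
--     n_minus = length // 2
--     plus = [A + k for k in range(n_plus)]
--     minus = [A - k for k in range(1, n_minus + 1)]
--     out = []
--     for p, m in zip(plus, minus):
--         out.append(p)
--         out.append(m)
--     if n_minus < n_plus:
--         out.append(A + n_plus - 1)
--     return out
-- ===== Notes on version B (the rewrite author's own statement) =====
-- stated objective: alternative
-- what changed: B builds the ascending 'plus' half and the descending 'minus' half as separate lists and interleaves them pair by pair (with one trailing plus element when length is odd), instead of A's single indexed loop branching on i % 2.
import Mathlib
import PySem

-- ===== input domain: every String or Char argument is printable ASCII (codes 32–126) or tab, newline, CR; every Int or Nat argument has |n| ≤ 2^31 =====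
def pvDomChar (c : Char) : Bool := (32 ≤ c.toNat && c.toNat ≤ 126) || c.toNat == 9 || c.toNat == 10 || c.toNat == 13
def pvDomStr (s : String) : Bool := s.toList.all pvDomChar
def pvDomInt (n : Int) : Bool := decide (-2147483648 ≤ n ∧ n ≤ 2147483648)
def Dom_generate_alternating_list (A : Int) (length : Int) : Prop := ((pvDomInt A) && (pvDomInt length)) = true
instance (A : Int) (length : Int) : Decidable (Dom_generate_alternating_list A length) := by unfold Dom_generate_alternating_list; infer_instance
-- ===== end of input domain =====

-- B interleaves a separately built 'plus' half and 'minus' half instead of A's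
-- single indexed loop branching on parity (objective: alternative decomposition).

-- ===== PORT A =====
-- for i in range(length): even i → append A + i//2, odd i → append A - (i//2 + 1)
def generate_alternating_list (A : Int) (length : Int) : List Int :=
  (PySem.List.pyRange 0 length 1).foldl
    (fun result i =>
      if PySem.Int.mod i 2 = 0 then
        result ++ [A + PySem.Int.floordiv i 2]
      else
        result ++ [A - (PySem.Int.floordiv i 2 + 1)])
    []

-- ===== PORT B =====
-- interleave helper: emit p, m for each zipped pair
def pvIlv (pairs : List (Int × Int)) : List Int :=
  match pairs with
  | [] => []
  | (p, m) :: rest => p :: m :: pvIlv rest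

def generate_alternating_list_alt (A : Int) (length : Int) : List Int :=
  if length ≤ 0 then []
  else
    let nPlus := PySem.Int.floordiv (length + 1) 2
    let nMinus := PySem.Int.floordiv length 2
    let plus := (PySem.List.pyRange 0 nPlus 1).map (fun k => A + k)
    let minus := (PySem.List.pyRange 1 (nMinus + 1) 1).map (fun k => A - k)
    let out := pvIlv (plus.zip minus)
    if nMinus < nPlus then out ++ [A + nPlus - 1] else out

-- ===== PRECONDITION & SPEC =====
def Spec_generate_alternating_list (A : Int) (length : Int) (out : List Int) : Prop := out = generate_alternating_list_alt A length
instance (A : Int) (length : Int) (out : List Int) : Decidable (Spec_generate_alternating_list A length out) := by unfold Spec_generate_alternating_list; infer_instance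

-- ===== CLAIM (what is proved, stated in full; the proofs are below) =====
def Claim_equal_generate_alternating_list : Prop := ∀ (A : Int) (length : Int), Dom_generate_alternating_list A length → Spec_generate_alternating_list A length (generate_alternating_list A length)

-- ===== LEMMAS AND PROOFS =====

-- common reference value: the i-th element of the output, i : Nat
def pvElem (A : Int) (i : Nat) : Int :=
  if i % 2 = 0 then A + (i / 2 : Nat) else A - ((i / 2 : Nat) + 1)

-- common reference list: [pvElem A 0, …, pvElem A (n-1)]
def pvSpec (A : Int) : Nat → List Int
  | 0 => []
  | n + 1 => pvSpec A n ++ [pvElem A n]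

lemma pvIlv_append (xs ys : List (Int × Int)) :
    pvIlv (xs ++ ys) = pvIlv xs ++ pvIlv ys := by
  induction xs with
  | nil => rfl
  | cons h t ih => cases h; simp [pvIlv, ih]

lemma zip_append_left {α β : Type} (xs : List α) (ys : List β) (x : α)
    (h : ys.length ≤ xs.length) : (xs ++ [x]).zip ys = xs.zip ys := by
  induction xs generalizing ys with
  | nil => cases ys with
    | nil => rfl
    | cons => simp at h
  | cons a t ih => cases ys with
    | nil => simp
    | cons b u => simp at h ⊢; exact ih u h

-- A's loop equals the reference list
lemma portA_eq_spec (A : Int) (n : Nat) :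
    generate_alternating_list A n = pvSpec A n := by
  induction n with
  | zero => simp [generate_alternating_list, pvSpec]
  | succ m ih =>
    unfold generate_alternating_list at ih ⊢
    rw [show ((m + 1 : Nat) : Int) = (m : Int) + 1 by push_cast; ring,
        PySem.List.pyRange_one_succ_right (by positivity), List.foldl_append, ih]
    simp only [List.foldl_cons, List.foldl_nil, pvSpec, pvElem]
    have hm : PySem.Int.mod (m : Int) 2 = (m : Int) % 2 :=
      PySem.Int.mod_eq_emod_of_pos (by norm_num)
    have hd : PySem.Int.floordiv (m : Int) 2 = (m : Int) / 2 :=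
      PySem.Int.floordiv_eq_ediv_of_pos (by norm_num)
    have he : ((m : Int)) / 2 = ((m / 2 : Nat) : Int) := by omega
    rw [hm, hd, he]
    by_cases hpar : m % 2 = 0
    · rw [if_pos (by omega), if_pos hpar]
    · rw [if_neg (by omega), if_neg hpar]

-- B's halves for a Nat length, in Nat form
def pvPlus (A : Int) (p : Nat) : List Int := (List.range p).map (fun k => A + (k : Nat))
def pvMinus (A : Int) (m : Nat) : List Int := (List.range m).map (fun k => A - ((k : Nat) + 1))

def pvAltNat (A : Int) (n : Nat) : List Int :=
  pvIlv ((pvPlus A ((n + 1) / 2)).zip (pvMinus A (n / 2))) ++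
    (if n / 2 < (n + 1) / 2 then [A + ((n + 1) / 2 : Nat) - 1] else [])

lemma length_pvPlus (A : Int) (p : Nat) : (pvPlus A p).length = p := by
  simp [pvPlus]
lemma length_pvMinus (A : Int) (m : Nat) : (pvMinus A m).length = m := by
  simp [pvMinus]

lemma pvPlus_succ (A : Int) (p : Nat) :
    pvPlus A (p + 1) = pvPlus A p ++ [A + (p : Nat)] := by
  simp [pvPlus, List.range_succ]
lemma pvMinus_succ (A : Int) (m : Nat) :
    pvMinus A (m + 1) = pvMinus A m ++ [A - ((m : Nat) + 1)] := by
  simp [pvMinus, List.range_succ]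

lemma pvAltNat_eq_spec (A : Int) (n : Nat) : pvAltNat A n = pvSpec A n := by
  induction n with
  | zero => simp [pvAltNat, pvSpec, pvPlus, pvMinus, pvIlv]
  | succ m ih =>
    rcases Nat.even_or_odd m with ⟨k, hk⟩ | ⟨k, hk⟩
    · -- m = 2k even: plus count k → k+1, minus count k stays
      subst hk
      have h1 : (k + k) / 2 = k := by omega
      have h2 : (k + k + 1) / 2 = k := by omega
      have h3 : (k + k + 1 + 1) / 2 = k + 1 := by omega
      unfold pvAltNat at ih ⊢
      simp only [h1, h2, h3] at ih ⊢
      rw [if_neg (lt_irrefl k), List.append_nil] at ih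
      rw [if_pos (Nat.lt_succ_self k), pvPlus_succ,
          zip_append_left _ _ _ (by rw [length_pvPlus, length_pvMinus]),
          show pvSpec A (k + k + 1) = pvSpec A (k + k) ++ [pvElem A (k + k)] from rfl,
          ← ih, pvElem, if_pos (by omega), h1]
      have hx : A + ((k + 1 : Nat) : Int) - 1 = A + (k : Int) := by push_cast; ring
      rw [hx]
    · -- m = 2k+1 odd: minus count k → k+1
      subst hk
      have h1 : (2 * k + 1) / 2 = k := by omega
      have h2 : (2 * k + 1 + 1) / 2 = k + 1 := by omega
      have h3 : (2 * k + 1 + 1 + 1) / 2 = k + 1 := by omega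
      unfold pvAltNat at ih ⊢
      simp only [h1, h2, h3] at ih ⊢
      rw [if_pos (Nat.lt_succ_self k), pvPlus_succ,
          zip_append_left _ _ _ (by rw [length_pvPlus, length_pvMinus])] at ih
      rw [if_neg (lt_irrefl (k + 1)), List.append_nil, pvPlus_succ, pvMinus_succ,
          List.zip_append (by rw [length_pvPlus, length_pvMinus]),
          pvIlv_append,
          show pvSpec A (2 * k + 1 + 1) = pvSpec A (2 * k + 1) ++ [pvElem A (2 * k + 1)] from rfl,
          ← ih, pvElem, if_neg (by omega), h1]
      have hx : A + ((k + 1 : Nat) : Int) - 1 = A + (k : Int) := by push_cast; ring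
      rw [hx]
      simp [pvIlv]

-- bridge: the Int-typed port B equals pvAltNat on nonnegative lengths
lemma portB_eq_altNat (A : Int) (n : Nat) :
    generate_alternating_list_alt A n = pvAltNat A n := by
  cases n with
  | zero => simp [generate_alternating_list_alt, pvAltNat, pvPlus, pvMinus, pvIlv]
  | succ m =>
    unfold generate_alternating_list_alt pvAltNat
    rw [if_neg (by exact_mod_cast Nat.not_succ_le_zero m)]
    have hP : PySem.Int.floordiv ((m + 1 : Nat) : Int) 2 = (((m + 1) / 2 : Nat) : Int) := by
      exact_mod_cast PySem.Int.floordiv_natCast (m + 1) 2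
    have hPP : PySem.Int.floordiv (((m + 1 : Nat) : Int) + 1) 2 = (((m + 1 + 1) / 2 : Nat) : Int) := by
      rw [show (((m + 1 : Nat) : Int) + 1) = ((m + 2 : Nat) : Int) by push_cast; ring]
      exact_mod_cast PySem.Int.floordiv_natCast (m + 2) 2
    simp only [hP, hPP]
    have hplus : (PySem.List.pyRange 0 ((((m + 1 + 1) / 2 : Nat)) : Int) 1).map (fun k => A + k)
        = pvPlus A ((m + 1 + 1) / 2) := by
      rw [PySem.List.pyRange_one]
      simp only [sub_zero, Int.toNat_natCast, List.map_map, pvPlus]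
      refine List.map_congr_left fun k _ => ?_
      simp
    have hminus : (PySem.List.pyRange 1 (((((m + 1) / 2 : Nat)) : Int) + 1) 1).map (fun k => A - k)
        = pvMinus A ((m + 1) / 2) := by
      rw [PySem.List.pyRange_one]
      have ht : ((((m + 1) / 2 : Nat) : Int) + 1 - 1).toNat = (m + 1) / 2 := by omega
      rw [ht]
      simp only [List.map_map, pvMinus]
      refine List.map_congr_left fun k _ => ?_
      simp only [Function.comp_apply]
      ring
    rw [hplus, hminus]
    have hsel : ((((m + 1) / 2 : Nat)) : Int) < (((m + 1 + 1) / 2 : Nat) : Int) ↔ (m + 1) / 2 < (m + 1 + 1) / 2 := by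
      exact_mod_cast Iff.rfl
    by_cases hc : (m + 1) / 2 < (m + 1 + 1) / 2
    · rw [if_pos (hsel.mpr hc), if_pos hc]
    · rw [if_neg (fun h => hc (hsel.mp h)), if_neg hc, List.append_nil]

-- ===== VERDICT (by name: the statement is the Claim_ definition above) =====
theorem generate_alternating_list_spec : Claim_equal_generate_alternating_list := by
  intro A length _
  unfold Spec_generate_alternating_list
  by_cases h : length ≤ 0
  · rw [show generate_alternating_list A length = [] by
        simp [generate_alternating_list, PySem.List.pyRange_one_eq_nil h]]
    rw [generate_alternating_list_alt, if_pos h]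
  · obtain ⟨n, hn⟩ : ∃ n : Nat, length = (n : Int) :=
      ⟨length.toNat, by omega⟩
    subst hn
    rw [portA_eq_spec, portB_eq_altNat, pvAltNat_eq_spec]
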